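-- pv_equiv track=rewrite | github.com/timmyloos/Sudoku | Board.py | is_valid_group
-- ===== SOURCE A (Python) =====
-- def is_valid_group(group):
--     seen = set()
--     for value in group:
--         if value == 0:
--             continue
--         if value in seen:
--             return False
--         seen.add(value)
--     return True
-- ===== SOURCE B (Python) =====
-- def is_valid_group(group):
--     nz = sorted(v for v in group if v != 0)
--     return all(a != b for a, b in zip(nz, nz[1:]))
-- ===== Notes on version B (the rewrite author's own statement) =====
-- stated objective: alternative
-- what changed: Detects duplicate nonzero values by sorting them and scanning adjacent pairs, instead of A's incremental seen-set with early return; no set is used at all.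
import Mathlib
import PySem

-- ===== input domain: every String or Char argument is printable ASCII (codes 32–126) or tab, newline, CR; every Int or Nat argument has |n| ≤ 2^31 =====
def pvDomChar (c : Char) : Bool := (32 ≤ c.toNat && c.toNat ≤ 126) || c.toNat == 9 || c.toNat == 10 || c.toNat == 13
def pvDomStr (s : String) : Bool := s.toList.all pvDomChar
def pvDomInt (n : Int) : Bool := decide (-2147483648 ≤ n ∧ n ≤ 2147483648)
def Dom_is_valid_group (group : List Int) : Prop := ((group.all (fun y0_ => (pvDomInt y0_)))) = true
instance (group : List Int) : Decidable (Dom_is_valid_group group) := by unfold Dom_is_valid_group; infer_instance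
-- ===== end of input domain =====

-- B finds duplicate nonzero values by sorting them and scanning adjacent pairs, instead of A's seen-set loop (alternative algorithm; same result).

-- ===== PORT A =====
-- the 'for value in group' loop carrying the mutable 'seen' set, with early return False
def is_valid_group_loop (seen : PySem.Set Int) : List Int → Bool
  | [] => true
  | value :: rest =>
    if value = 0 then is_valid_group_loop seen rest
    else if PySem.Set.contains seen value then false
    else is_valid_group_loop (PySem.Set.add seen value) rest

def is_valid_group (group : List Int) : Bool :=
  is_valid_group_loop PySem.Set.empty group

-- ===== PORT B =====
-- nz = sorted(v for v in group if v != 0); all(a != b for a, b in zip(nz, nz[1:]))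
def is_valid_group_alt (group : List Int) : Bool :=
  let nz := PySem.List.sorted (group.filter (fun v => v ≠ 0)) (fun x => x) false
  (nz.zip (nz.drop 1)).all (fun p => p.1 != p.2)

-- ===== PRECONDITION & SPEC =====
def Spec_is_valid_group (group : List Int) (out : Bool) : Prop := out = is_valid_group_alt group
instance (group : List Int) (out : Bool) : Decidable (Spec_is_valid_group group out) := by unfold Spec_is_valid_group; infer_instance

-- ===== CLAIM (what is proved, stated in full; the proofs are below) =====
def Claim_equal_is_valid_group : Prop := ∀ (group : List Int), Dom_is_valid_group group → Spec_is_valid_group group (is_valid_group group)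

-- ===== LEMMAS AND PROOFS =====

-- A's loop succeeds iff the nonzero elements not yet seen are distinct
theorem pv_loop_iff (l : List Int) (seen : PySem.Set Int) :
    is_valid_group_loop seen l = true ↔
      ((l.filter (fun v => v ≠ 0)).Nodup ∧ ∀ v ∈ l.filter (fun v => v ≠ 0), v ∉ seen) := by
  induction l generalizing seen with
  | nil => simp [is_valid_group_loop]
  | cons v rest ih =>
    by_cases hv : v = 0
    · subst hv
      rw [show is_valid_group_loop seen (0 :: rest) = is_valid_group_loop seen rest from by
        simp [is_valid_group_loop]]
      rw [ih seen]
      simp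
    · simp only [is_valid_group_loop, if_neg hv]
      have hfil : (v :: rest).filter (fun v => v ≠ 0) = v :: rest.filter (fun v => v ≠ 0) := by
        simp [hv]
      rw [hfil]
      by_cases hmem : v ∈ seen
      · have hct : PySem.Set.contains seen v = true := (PySem.Set.contains_iff seen v).mpr hmem
        rw [if_pos hct]
        constructor
        · intro h; exact absurd h (by simp)
        · rintro ⟨-, h⟩; exact absurd hmem (h v (by simp))
      · have hcn : ¬ (PySem.Set.contains seen v = true) :=
          fun h => hmem ((PySem.Set.contains_iff seen v).mp h)
        have hadd : PySem.Set.add seen v = seen ++ [v] := by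
          simp [PySem.Set.add, hmem]
        rw [if_neg hcn, hadd, ih (seen ++ [v])]
        simp only [List.nodup_cons, List.mem_cons, List.mem_append]
        constructor
        · rintro ⟨hnd, hmemr⟩
          refine ⟨⟨fun hvin => (hmemr v hvin) (by simp), hnd⟩, fun y hy => ?_⟩
          rcases hy with rfl | hy
          · exact hmem
          · intro hyS; exact hmemr y hy (Or.inl hyS)
        · rintro ⟨⟨hvnin, hnd⟩, hmemr⟩
          refine ⟨hnd, fun y hy hyin => ?_⟩
          rcases hyin with h | h
          · exact hmemr y (Or.inr hy) h
          · simp only [List.not_mem_nil, or_false] at h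
            subst h; exact hvnin hy

-- the adjacent-pair scan is Chain' (· ≠ ·)
theorem pv_zip_all_iff_chain' (l : List Int) :
    ((l.zip (l.drop 1)).all (fun p => p.1 != p.2) = true) ↔ List.IsChain (· ≠ ·) l := by
  induction l with
  | nil => simp
  | cons a l ih =>
    cases l with
    | nil => simp
    | cons b l =>
      simp only [List.drop_succ_cons, List.drop_zero, List.zip_cons_cons, List.all_cons,
        Bool.and_eq_true, bne_iff_ne, List.isChain_cons_cons] at *
      rw [← ih]

-- in a ≤-sorted list, distinct adjacent elements force strict increase
theorem pv_lt_chain (l : List Int) (hp : l.Pairwise (fun a b => a ≤ b))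
    (hc : List.IsChain (· ≠ ·) l) : List.IsChain (· < ·) l := by
  induction l with
  | nil => simp
  | cons a l ih =>
    cases l with
    | nil => simp
    | cons b t =>
      rw [List.isChain_cons_cons] at hc ⊢
      exact ⟨lt_of_le_of_ne (List.rel_of_pairwise_cons hp (List.mem_cons_self)) hc.1,
        ih hp.tail hc.2⟩

-- a ≤-sorted list has distinct adjacent elements iff it is Nodup
theorem pv_sorted_chain'_iff_nodup (l : List Int)
    (hp : l.Pairwise (fun a b => a ≤ b)) :
    List.IsChain (· ≠ ·) l ↔ l.Nodup := by
  constructor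
  · intro hc
    exact (List.isChain_iff_pairwise.mp (pv_lt_chain l hp hc)).imp ne_of_lt
  · intro hn
    exact hn.isChain

-- ===== VERDICT (by name: the statement is the Claim_ definition above) =====
theorem is_valid_group_spec : Claim_equal_is_valid_group := by
  intro group _
  unfold Spec_is_valid_group is_valid_group is_valid_group_alt
  rw [Bool.eq_iff_iff, pv_loop_iff, pv_zip_all_iff_chain',
    pv_sorted_chain'_iff_nodup _ (PySem.List.sorted_pairwise _ _),
    (PySem.List.sorted_perm _ _ _).nodup_iff]
  simp [PySem.Set.empty]
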